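-- pv_equiv track=rewrite | github.com/onyinyechiekezie/pythonClass | functionTasks/tigernut/evensumtask.py | get_sumodddigits
-- ===== SOURCE A (Python) =====
-- def get_sumodddigits(number):
-- 	total = 0
-- 	remainder = 0
-- 	while number > 0:
-- 		if number % 2 != 0:
-- 			remainder = number % 10
-- 			total = total + remainder
-- 		number = number // 10
-- 	return total
-- ===== SOURCE B (Python) =====
-- def get_sumodddigits(number):
--     if number <= 0:
--         return 0
--     return sum(int(c) for c in str(number) if int(c) % 2 != 0)
-- ===== Notes on version B (the rewrite author's own statement) =====
-- stated objective: alternative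
-- what changed: B extracts the digits from the decimal string representation str(number) and sums the odd ones in one comprehension, instead of A's arithmetic loop peeling digits off with modulus and floor division while testing the running value's parity.
import Mathlib
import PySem

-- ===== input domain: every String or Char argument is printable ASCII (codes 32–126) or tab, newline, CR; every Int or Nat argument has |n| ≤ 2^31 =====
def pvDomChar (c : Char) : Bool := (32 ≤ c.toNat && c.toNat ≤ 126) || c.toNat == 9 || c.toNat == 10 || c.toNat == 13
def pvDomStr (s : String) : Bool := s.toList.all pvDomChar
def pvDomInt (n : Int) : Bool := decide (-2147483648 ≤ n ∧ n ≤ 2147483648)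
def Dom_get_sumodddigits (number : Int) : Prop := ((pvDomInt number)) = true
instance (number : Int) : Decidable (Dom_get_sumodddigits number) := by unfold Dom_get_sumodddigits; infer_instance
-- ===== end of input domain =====

-- B sums the odd decimal digits read off str(number) instead of A's %10-peeling loop; same cost, alternative structure.

-- ===== PORT A =====
-- the while loop of A as a tail recursion over the same state (number, total)
def pvGoA (number total : Int) : Int :=
  if _h : 0 < number then
    pvGoA (PySem.Int.floordiv number 10)
      (if PySem.Int.mod number 2 ≠ 0 then total + PySem.Int.mod number 10 else total)
  else total
termination_by number.toNat
decreasing_by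
  rw [PySem.Int.floordiv_eq_ediv_of_pos (by omega)]
  have h1 : number = ((number.toNat : Nat) : Int) := by omega
  have h2 : number / 10 = ((number.toNat / 10 : Nat) : Int) := by
    rw [h1]; exact_mod_cast (Int.natCast_div number.toNat 10).symm
  rw [h2]
  have h3 : number.toNat / 10 < number.toNat := Nat.div_lt_self (by omega) (by norm_num)
  omega

def get_sumodddigits (number : Int) : Int := pvGoA number 0

-- ===== PORT B =====
-- int(c) for a decimal digit character c of str(number) is exactly c.toNat - 48
def get_sumodddigits_alt (number : Int) : Int :=
  if 0 < number then
    (((PySem.Int.toStr number).toList.filter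
        (fun c => PySem.Int.mod ((c.toNat : Int) - 48) 2 ≠ 0)).map
      (fun c => ((c.toNat : Int) - 48))).sum
  else 0

-- ===== PRECONDITION & SPEC =====
def Spec_get_sumodddigits (number : Int) (out : Int) : Prop := out = get_sumodddigits_alt number
instance (number : Int) (out : Int) : Decidable (Spec_get_sumodddigits number out) := by unfold Spec_get_sumodddigits; infer_instance

-- ===== CLAIM (what is proved, stated in full; the proofs are below) =====
def Claim_equal_get_sumodddigits : Prop := ∀ (number : Int), Dom_get_sumodddigits number → Spec_get_sumodddigits number (get_sumodddigits number)

-- ===== LEMMAS AND PROOFS =====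

-- the canonical value both programs compute: the sum of the odd decimal digits of m
def pvOddDigitSum (m : Nat) : Int := (((Nat.digits 10 m).filter (fun d => d % 2 = 1)).sum : Nat)

lemma pvGoA_eq (m : Nat) (t : Int) : pvGoA (m : Int) t = t + pvOddDigitSum m := by
  induction m using Nat.strong_induction_on generalizing t with
  | _ m ih =>
    rcases Nat.eq_zero_or_pos m with hm | hm
    · subst hm
      rw [pvGoA.eq_def, pvOddDigitSum]
      simp
    · rw [pvGoA.eq_def]
      have hpos : (0 : Int) < (m : Int) := by exact_mod_cast hm
      rw [dif_pos hpos]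
      have hdiv : PySem.Int.floordiv (m : Int) 10 = ((m / 10 : Nat) : Int) := by
        exact_mod_cast PySem.Int.floordiv_natCast m 10
      have hmod2 : PySem.Int.mod (m : Int) 2 = ((m % 2 : Nat) : Int) := by
        exact_mod_cast PySem.Int.mod_natCast m 2
      have hmod10 : PySem.Int.mod (m : Int) 10 = ((m % 10 : Nat) : Int) := by
        exact_mod_cast PySem.Int.mod_natCast m 10
      rw [hdiv, hmod2, hmod10,
        ih (m / 10) (Nat.div_lt_self hm (by norm_num))]
      have hdig : Nat.digits 10 m = m % 10 :: Nat.digits 10 (m / 10) :=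
        Nat.digits_def' (by norm_num) hm
      have hmm : m % 10 % 2 = m % 2 := Nat.mod_mod_of_dvd m (by norm_num)
      rw [pvOddDigitSum, pvOddDigitSum, hdig]
      by_cases h2 : m % 2 = 1
      · rw [if_pos (by simp; omega), List.filter_cons_of_pos (by simp; omega)]
        push_cast
        simp only [List.map_cons, List.sum_cons]
        push_cast
        ring
      · rw [if_neg (by simp; omega), List.filter_cons_of_neg (by simp; omega)]

lemma pvToDigitsCore_eq (fuel : Nat) : ∀ (n : Nat) (acc : List Char), 0 < n → n < fuel →
    Nat.toDigitsCore 10 fuel n acc = ((Nat.digits 10 n).map Nat.digitChar).reverse ++ acc := by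
  induction fuel with
  | zero => intro n acc h0 hf; omega
  | succ fuel ih =>
    intro n acc h0 hf
    rw [Nat.toDigitsCore]
    have hdig : Nat.digits 10 n = n % 10 :: Nat.digits 10 (n / 10) :=
      Nat.digits_def' (by norm_num) h0
    by_cases hq : n / 10 = 0
    · have : Nat.digits 10 (n / 10) = [] := by rw [hq]; simp
      simp [hq, hdig]
    · rw [if_neg hq, ih (n / 10) _ (Nat.pos_of_ne_zero hq)
        (by have := Nat.div_lt_self h0 (by norm_num : 1 < 10); omega), hdig]
      simp

-- each digit of `Nat.digits 10 m` is < 10, so char decoding is exact on them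
lemma pvDigitChar_val (d : Nat) (hd : d < 10) :
    ((Nat.digitChar d).toNat : Int) - 48 = (d : Int) := by
  interval_cases d <;> decide

lemma pvAlt_eq (m : Nat) (hm : 0 < m) :
    get_sumodddigits_alt (m : Int) = pvOddDigitSum m := by
  rw [get_sumodddigits_alt, if_pos (by exact_mod_cast hm)]
  have htochars : (PySem.Int.toStr (m : Int)).toList = Nat.toDigits 10 m := by
    rw [PySem.Int.toList_toStr, PySem.Int.toChars]
    rw [if_neg (by omega)]
    simp
  rw [htochars, Nat.toDigits, pvToDigitsCore_eq (m + 1) m [] hm (by omega)]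
  simp only [List.append_nil, List.filter_reverse, List.map_reverse, List.sum_reverse,
    List.filter_map, List.map_map]
  have hlt : ∀ d ∈ Nat.digits 10 m, d < 10 := fun d hd => Nat.digits_lt_base (by norm_num) hd
  -- rewrite char-level predicate/value into digit-level ones, elementwise
  rw [List.filter_congr (l := Nat.digits 10 m)
      (q := fun d => decide (d % 2 = 1))
      (by intro d hd
          have h10 := hlt d hd
          simp only [Function.comp]
          rw [pvDigitChar_val d h10]
          have : PySem.Int.mod (d : Int) 2 = ((d % 2 : Nat) : Int) := by
            exact_mod_cast PySem.Int.mod_natCast d 2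
          rw [this]; simp; omega)]
  rw [List.map_congr_left
      (by intro d hd
          have h10 := hlt d (List.mem_of_mem_filter hd)
          simp only [Function.comp]
          exact pvDigitChar_val d h10)]
  rw [pvOddDigitSum]
  push_cast
  rfl

-- ===== VERDICT (by name: the statement is the Claim_ definition above) =====
theorem get_sumodddigits_spec : Claim_equal_get_sumodddigits := by
  intro number _
  unfold Spec_get_sumodddigits get_sumodddigits
  by_cases h : 0 < number
  · have hm : number = ((number.toNat : Nat) : Int) := by omega
    rw [hm, pvGoA_eq, pvAlt_eq number.toNat (by omega)]
    ring
  · rw [pvGoA.eq_def, dif_neg h, get_sumodddigits_alt, if_neg h]
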